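-- pv_equiv track=rewrite | github.com/rodrigopolastro/maratona-interfatecs | problemas-resolvidos/2ª Fase/Problemas_2015/f_letras.py | solve
-- ===== SOURCE A (Python) =====
-- from typing import Set, List
--
-- def distinct(text: str) -> Set[str]:
--     return set((c for c in text.upper()))
--
-- def sorted_padding(entries: Set[str], padding: int) -> List[str]:
--     output = set()
--     for entry in entries:
--         padded_entry = entry.ljust(padding, ' ')
--         output.add(padded_entry.strip())
--     return sorted(output)
--
-- def combinations(entries: List[str], length: int) -> List[str]:
--     if length == 0:
--         return ['']
--
--     if len(entries) == 0:
--         return []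
--
--     entries = sorted(entries)
--     result = []
--
--     for i in range(len(entries)):
--         current = entries[i]
--         remaining = entries[i + 1:]
--         for comb in combinations(remaining, length - 1):
--             result.append(current + comb)
--
--     return result
--
-- def solve(text: str) -> str:
--     combinations_set = set()
--     length = len(text)
--
--     for i in range(1, len(text) + 1):
--         disctints = combinations(sorted(distinct(text)), i)
--         for comb in disctints:
--             if comb not in combinations_set:
--                 combinations_set.add(comb)
--
--     return ' '.join(sorted_padding(combinations_set, length))
-- ===== SOURCE B (Python) =====
-- def solve(text: str) -> str:
--     letters = sorted(set(text.upper()))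
--     subs = ['']
--     for c in letters:
--         subs = subs + [s + c for s in subs]
--     return ' '.join(sorted({s.strip() for s in subs if s}))
-- ===== Notes on version B (the rewrite author's own statement) =====
-- stated objective: faster
-- what changed: Replaced the per-length recursive combinations helper (re-invoked with a re-sort for every length 1..len(text), i.e. len(text) outer passes) with a single iterative powerset-doubling pass over the sorted distinct letters, deduplicated and sorted once at the end.
import Mathlib
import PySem

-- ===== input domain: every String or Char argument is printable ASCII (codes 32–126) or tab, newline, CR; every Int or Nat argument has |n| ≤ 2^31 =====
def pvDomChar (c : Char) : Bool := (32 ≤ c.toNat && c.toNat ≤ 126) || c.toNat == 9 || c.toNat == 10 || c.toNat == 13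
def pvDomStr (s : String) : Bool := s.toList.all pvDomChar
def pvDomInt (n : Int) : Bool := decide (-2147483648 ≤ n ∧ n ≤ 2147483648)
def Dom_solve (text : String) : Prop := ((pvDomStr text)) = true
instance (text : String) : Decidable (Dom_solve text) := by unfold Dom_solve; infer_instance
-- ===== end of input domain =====

-- B replaces A's per-length recursive `combinations` enumeration with one iterative
-- powerset-doubling pass over the sorted distinct letters (objective: faster, and simpler).

-- ===== PORT A =====
-- Python str values are modelled as List Char (PySem.Chars level); the result is packed with String.ofList.

-- distinct(text) = set(c for c in text.upper())  (iterating a str yields its 1-character strings)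
def pvDistinct (text : String) : PySem.Set (List Char) :=
  PySem.Set.ofList ((PySem.Chars.upper text.toList).map (fun c => [c]))

-- entry.ljust(padding, ' ') — hand port (no PySem primitive): exact, appends spaces up to width w
def pvLjust (s : List Char) (w : Int) : List Char :=
  s ++ List.replicate (w - (s.length : Int)).toNat ' '

-- sorted_padding(entries, padding)
def pvSortedPadding (entries : List (List Char)) (padding : Int) : List (List Char) :=
  PySem.List.sorted
    (entries.foldl (fun out e => PySem.Set.add out (PySem.Chars.strip (pvLjust e padding)))
      PySem.Set.empty)
    (fun x => x)

-- combinations(entries, length): the for-i loop over suffixes entries[i+1:] is the structural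
-- recursion pvCombGo over the sorted list
mutual
def pvCombinations (entries : List (List Char)) (len : Int) : List (List Char) :=
  if len = 0 then [[]]
  else if entries = [] then []
  else pvCombGo (PySem.List.sorted entries (fun x => x)) len
  termination_by (entries.length, 1)
  decreasing_by exact Prod.Lex.right' _ (by rw [PySem.List.length_sorted]) (by omega)
def pvCombGo (es : List (List Char)) (len : Int) : List (List Char) :=
  match es with
  | [] => []
  | c :: rest => ((pvCombinations rest (len - 1)).map (fun comb => c ++ comb)) ++ pvCombGo rest len
  termination_by (es.length, 0)
  decreasing_by
  · exact Prod.Lex.left _ _ (by simp)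
  · exact Prod.Lex.left _ _ (by simp)
end

def solve (text : String) : String :=
  let length : Int := PySem.Chars.len text.toList
  let cset : PySem.Set (List Char) :=
    (PySem.List.pyRange 1 (PySem.Chars.len text.toList + 1) 1).foldl
      (fun cs i =>
        (pvCombinations (PySem.List.sorted (pvDistinct text) (fun x => x)) i).foldl
          (fun cs comb => if PySem.Set.contains cs comb then cs else PySem.Set.add cs comb) cs)
      PySem.Set.empty
  String.ofList (PySem.Chars.join [' '] (pvSortedPadding cset length))

-- ===== PORT B =====
def solve_alt (text : String) : String :=
  let letters : List (List Char) :=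
    PySem.List.sorted (PySem.Set.ofList ((PySem.Chars.upper text.toList).map (fun c => [c])))
      (fun x => x)
  let subs : List (List Char) :=
    letters.foldl (fun subs c => subs ++ subs.map (fun s => s ++ c)) [[]]
  String.ofList (PySem.Chars.join [' ']
    (PySem.List.sorted
      (PySem.Set.ofList ((subs.filter (fun s => !s.isEmpty)).map PySem.Chars.strip))
      (fun x => x)))

-- ===== PRECONDITION & SPEC =====
def Spec_solve (text : String) (out : String) : Prop := out = solve_alt text
instance (text : String) (out : String) : Decidable (Spec_solve text out) := by unfold Spec_solve; infer_instance

-- ===== CLAIM (what is proved, stated in full; the proofs are below) =====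
def Claim_equal_solve : Prop := ∀ (text : String), Dom_solve text → Spec_solve text (solve text)

-- ===== LEMMAS AND PROOFS =====

-- rstrip drops a block of trailing spaces
theorem pv_rstrip_append_spaces (s : List Char) (k : Nat) :
    PySem.Chars.rstrip (s ++ List.replicate k ' ') = PySem.Chars.rstrip s := by
  have h : PySem.Chars.isspace ' ' = true := by decide
  simp [PySem.Chars.rstrip, List.reverse_append, h]

-- strip ∘ ljust = strip
theorem pv_strip_ljust (s : List Char) (w : Int) :
    PySem.Chars.strip (pvLjust s w) = PySem.Chars.strip s := by
  have h : PySem.Chars.isspace ' ' = true := by decide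
  simp only [pvLjust, PySem.Chars.strip, PySem.Chars.lstrip, List.dropWhile_append]
  split
  · rename_i he
    simp only [List.isEmpty_iff] at he
    simp [he, h, PySem.Chars.rstrip]
  · exact pv_rstrip_append_spaces _ _

-- the guarded insertion loop of solve is just repeated Set.add
theorem pv_if_contains_add :
    (fun (cs : PySem.Set (List Char)) comb =>
        if PySem.Set.contains cs comb then cs else PySem.Set.add cs comb)
      = fun cs comb => PySem.Set.add cs comb := by
  funext cs comb
  by_cases h : PySem.Set.contains cs comb
  · rw [if_pos h, PySem.Set.add, if_pos h]
  · rw [if_neg h]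


-- membership in the double accumulation loop of solve
theorem pv_mem_outer (rs : List Int) (g : Int → List (List Char)) (s : PySem.Set (List Char))
    (y : List Char) :
    y ∈ rs.foldl (fun cs i => (g i).foldl (fun cs comb => PySem.Set.add cs comb) cs) s
      ↔ y ∈ s ∨ ∃ i ∈ rs, y ∈ g i := by
  induction rs generalizing s with
  | nil => simp
  | cons i rs ih =>
    simp only [List.foldl_cons, ih]
    have h := PySem.Set.mem_foldl_add (g i) (fun x => x) s y
    rw [h]
    constructor
    · rintro ((hy | ⟨b, hb, rfl⟩) | ⟨j, hj, hy⟩)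
      · exact Or.inl hy
      · exact Or.inr ⟨i, by simp, hb⟩
      · exact Or.inr ⟨j, by simp [hj], hy⟩
    · rintro (hy | ⟨j, hj, hy⟩)
      · exact Or.inl (Or.inl hy)
      · rcases List.mem_cons.mp hj with rfl | hj
        · exact Or.inl (Or.inr ⟨y, hy, rfl⟩)
        · exact Or.inr ⟨j, hj, hy⟩

-- same sorted call with the LinearOrder instances PySem's order lemmas are stated with
theorem pv_sorted_inst (es : List (List Char)) :
    PySem.List.sorted es (fun x => x)
    = @PySem.List.sorted (List Char) (List Char) List.instLinearOrder.toLT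
        LinearOrder.toDecidableLT es (fun x => x) false := by
  congr 1

-- characterisation of A's combinations on a strictly sorted list
theorem pv_comb_mem (es : List (List Char)) (hp : es.Pairwise (· < ·)) :
    (∀ (len : Int) (x : List Char),
        x ∈ pvCombGo es len
          ↔ ∃ t : List (List Char), t.Sublist es ∧ t ≠ [] ∧ (t.length : Int) = len ∧ x = t.flatten)
    ∧ (∀ (len : Int) (x : List Char),
        x ∈ pvCombinations es len
          ↔ ∃ t : List (List Char), t.Sublist es ∧ (t.length : Int) = len ∧ x = t.flatten) := by
  induction es with
  | nil =>
    constructor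
    · intro len x
      rw [pvCombGo]
      simp
    · intro len x
      rw [pvCombinations]
      by_cases h : len = 0
      · subst h
        simp only [reduceIte, List.mem_singleton]
        constructor
        · rintro rfl; exact ⟨[], List.nil_sublist _, by simp, rfl⟩
        · rintro ⟨t, ht, _, rfl⟩
          rcases List.sublist_nil.mp ht with rfl; rfl
      · rw [if_neg h]; simp only [reduceIte]
        simp only [List.not_mem_nil, false_iff]
        rintro ⟨t, ht, hl, -⟩
        rcases List.sublist_nil.mp ht with rfl
        simp at hl
        exact h hl.symm
  | cons c rest ih =>
    have hrest := ih (List.Pairwise.of_cons hp)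
    have hgo : ∀ (len : Int) (x : List Char),
        x ∈ pvCombGo (c :: rest) len
          ↔ ∃ t : List (List Char),
              t.Sublist (c :: rest) ∧ t ≠ [] ∧ (t.length : Int) = len ∧ x = t.flatten := by
      intro len x
      rw [pvCombGo]
      simp only [List.mem_append, List.mem_map, hrest.1, hrest.2]
      constructor
      · rintro (⟨comb, ⟨t', hs, hl, rfl⟩, rfl⟩ | ⟨t, hs, hne, hl, rfl⟩)
        · refine ⟨c :: t', List.cons_sublist_cons.mpr hs, by simp, ?_, by simp⟩
          simp only [List.length_cons]
          push_cast
          omega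
        · exact ⟨t, hs.trans (List.sublist_cons_self c rest), hne, hl, rfl⟩
      · rintro ⟨t, hs, hne, hl, rfl⟩
        rcases List.sublist_cons_iff.mp hs with h | ⟨r, rfl, hr⟩
        · exact Or.inr ⟨t, h, hne, hl, rfl⟩
        · refine Or.inl ⟨r.flatten, ⟨r, hr, ?_, rfl⟩, by simp⟩
          simp only [List.length_cons] at hl
          push_cast at hl ⊢
          omega
    refine ⟨hgo, ?_⟩
    intro len x
    rw [pvCombinations]
    by_cases h0 : len = 0
    · subst h0
      simp only [reduceIte, List.mem_singleton]
      constructor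
      · rintro rfl; exact ⟨[], List.nil_sublist _, rfl, rfl⟩
      · rintro ⟨t, hs, hl, rfl⟩
        have ht0 : t.length = 0 := by exact_mod_cast hl
        rcases List.length_eq_zero_iff.mp ht0 with rfl
        rfl
    · rw [if_neg h0, if_neg (by simp)]
      have hsort : PySem.List.sorted (c :: rest) (fun x => x) = c :: rest := by
        rw [pv_sorted_inst]
        exact PySem.List.sorted_eq_self_of_pairwise _ _ (hp.imp le_of_lt)
      rw [hsort, hgo]
      constructor
      · rintro ⟨t, hs, _, hl, rfl⟩; exact ⟨t, hs, hl, rfl⟩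
      · rintro ⟨t, hs, hl, rfl⟩
        refine ⟨t, hs, ?_, hl, rfl⟩
        rintro rfl
        simp at hl
        exact h0 hl.symm

-- characterisation of B's doubling loop
theorem pv_mem_doubling (L init : List (List Char)) (x : List Char) :
    x ∈ L.foldl (fun subs c => subs ++ subs.map (fun s => s ++ c)) init
      ↔ ∃ s ∈ init, ∃ t : List (List Char), t.Sublist L ∧ x = s ++ t.flatten := by
  induction L generalizing init with
  | nil => simp
  | cons c L ih =>
    simp only [List.foldl_cons, ih]
    constructor
    · rintro ⟨s, hs, t, ht, rfl⟩
      rcases List.mem_append.mp hs with hs | hs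
      · exact ⟨s, hs, t, ht.trans (List.sublist_cons_self c L), rfl⟩
      · rcases List.mem_map.mp hs with ⟨s₀, hs₀, rfl⟩
        exact ⟨s₀, hs₀, c :: t, List.cons_sublist_cons.mpr ht, by simp⟩
    · rintro ⟨s, hs, t, ht, rfl⟩
      rcases List.sublist_cons_iff.mp ht with h | ⟨r, rfl, hr⟩
      · exact ⟨s, List.mem_append_left _ hs, t, h, rfl⟩
      · exact ⟨s ++ c, List.mem_append_right _ (List.mem_map.mpr ⟨s, hs, rfl⟩), r, hr, by simp⟩

-- ===== VERDICT (by name: the statement is the Claim_ definition above) =====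
theorem solve_spec : Claim_equal_solve := by
  intro text _hdom
  unfold Spec_solve
  simp only [solve, solve_alt, pvSortedPadding, pvDistinct]
  set U : List (List Char) := (PySem.Chars.upper text.toList).map (fun c => [c]) with hU
  set L : List (List Char) := PySem.List.sorted (PySem.Set.ofList U) (fun x => x) with hL
  set n : Nat := text.toList.length with hn
  have hlenI : PySem.Chars.len text.toList = (n : Int) := by simp [PySem.Chars.len, hn]
  -- letters are strictly increasing, nonempty, and at most n of them
  have hpair : L.Pairwise (· < ·) := by
    rw [hL, pv_sorted_inst]
    exact PySem.List.sorted_ofList_pairwise_lt U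
  have hne : ∀ e ∈ L, e ≠ [] := by
    intro e he
    rw [hL, PySem.List.mem_sorted, PySem.Set.mem_ofList, hU] at he
    rcases List.mem_map.mp he with ⟨c, -, rfl⟩
    simp
  have hLlen : L.length ≤ n := by
    have h1 : L.length = (PySem.Set.ofList U).length := by rw [hL, PySem.List.length_sorted]
    have h2 : (PySem.Set.ofList U).length ≤ U.length := PySem.Set.length_ofList_le U
    have h3 : U.length = n := by
      rw [hU, List.length_map, hn, PySem.Chars.upper, List.length_map]
    omega
  -- for sublists of L: flatten is [] only on the empty sublist
  have hflat : ∀ t : List (List Char), t.Sublist L → (t.flatten = [] ↔ t = []) := by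
    intro t ht
    constructor
    · intro h
      rcases t with _ | ⟨e, t⟩
      · rfl
      · exfalso
        have he : e ∈ L := ht.subset (List.mem_cons_self ..)
        have : e = [] := (List.flatten_eq_nil_iff.mp h) e (List.mem_cons_self ..)
        exact hne e he this
    · rintro rfl; rfl
  rw [pv_if_contains_add, hlenI]
  -- A's accumulated set holds exactly the flattenings of the nonempty sublists of L
  have hA : ∀ y : List Char,
      y ∈ (PySem.List.pyRange 1 ((n : Int) + 1) 1).foldl
            (fun cs i => (pvCombinations L i).foldl (fun cs comb => PySem.Set.add cs comb) cs)
            PySem.Set.empty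
        ↔ ∃ t : List (List Char), t.Sublist L ∧ t ≠ [] ∧ y = t.flatten := by
    intro y
    rw [pv_mem_outer]
    constructor
    · rintro (hy | ⟨i, hi, hy⟩)
      · cases hy
      · rcases ((pv_comb_mem L hpair).2 i y).mp hy with ⟨t, hs, hl, rfl⟩
        have hi' := PySem.List.mem_pyRange_one.mp hi
        refine ⟨t, hs, ?_, rfl⟩
        rintro rfl
        simp at hl
        omega
    · rintro ⟨t, hs, htne, rfl⟩
      refine Or.inr ⟨(t.length : Int), PySem.List.mem_pyRange_one.mpr ⟨?_, ?_⟩,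
        ((pv_comb_mem L hpair).2 _ _).mpr ⟨t, hs, rfl, rfl⟩⟩
      · have : 0 < t.length := List.length_pos_iff.mpr htne
        omega
      · have := hs.length_le
        omega
  -- the two final deduplicated pools have the same members
  have hSA : ∀ x : List Char,
      x ∈ ((PySem.List.pyRange 1 ((n : Int) + 1) 1).foldl
            (fun cs i => (pvCombinations L i).foldl (fun cs comb => PySem.Set.add cs comb) cs)
            PySem.Set.empty).foldl
            (fun out e => PySem.Set.add out (PySem.Chars.strip (pvLjust e (n : Int))))
            PySem.Set.empty
        ↔ ∃ t : List (List Char), t.Sublist L ∧ t ≠ [] ∧ x = PySem.Chars.strip t.flatten := by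
    intro x
    rw [PySem.Set.mem_foldl_add]
    constructor
    · rintro (hx | ⟨e, he, rfl⟩)
      · cases hx
      · rcases (hA e).mp he with ⟨t, hs, htne, rfl⟩
        exact ⟨t, hs, htne, pv_strip_ljust _ _⟩
    · rintro ⟨t, hs, htne, rfl⟩
      exact Or.inr ⟨t.flatten, (hA _).mpr ⟨t, hs, htne, rfl⟩, by rw [pv_strip_ljust]⟩
  have hSB : ∀ x : List Char,
      x ∈ PySem.Set.ofList
            (((L.foldl (fun subs c => subs ++ subs.map (fun s => s ++ c)) [[]]).filter
                (fun s => !s.isEmpty)).map PySem.Chars.strip)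
        ↔ ∃ t : List (List Char), t.Sublist L ∧ t ≠ [] ∧ x = PySem.Chars.strip t.flatten := by
    intro x
    rw [PySem.Set.mem_ofList]
    simp only [List.mem_map, List.mem_filter]
    constructor
    · rintro ⟨s, ⟨hs, hsne⟩, rfl⟩
      rcases (pv_mem_doubling L [[]] s).mp hs with ⟨s₀, hs₀, t, ht, rfl⟩
      rcases List.mem_singleton.mp hs₀ with rfl
      simp only [List.nil_append] at hsne ⊢
      refine ⟨t, ht, ?_, rfl⟩
      intro h
      rw [(hflat t ht).mpr h] at hsne
      simp at hsne
    · rintro ⟨t, ht, htne, rfl⟩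
      refine ⟨t.flatten, ⟨(pv_mem_doubling L [[]] t.flatten).mpr ⟨[], by simp, t, ht, by simp⟩, ?_⟩, rfl⟩
      simp only [Bool.not_eq_eq_eq_not, Bool.not_true, List.isEmpty_eq_false_iff]
      exact fun h => htne ((hflat t ht).mp h)
  -- both pools are duplicate-free, so they are a permutation of each other; sorting agrees
  have hnodA : (((PySem.List.pyRange 1 ((n : Int) + 1) 1).foldl
            (fun cs i => (pvCombinations L i).foldl (fun cs comb => PySem.Set.add cs comb) cs)
            PySem.Set.empty).foldl
            (fun out e => PySem.Set.add out (PySem.Chars.strip (pvLjust e (n : Int))))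
            PySem.Set.empty).Nodup := by
    rw [← PySem.Set.update_map_eq_foldl_add, PySem.Set.update_empty]
    exact PySem.Set.nodup_ofList _
  have hnodB : (PySem.Set.ofList
            (((L.foldl (fun subs c => subs ++ subs.map (fun s => s ++ c)) [[]]).filter
                (fun s => !s.isEmpty)).map PySem.Chars.strip)).Nodup :=
    PySem.Set.nodup_ofList _
  have hperm := (List.perm_ext_iff_of_nodup hnodA hnodB).mpr
    (fun x => (hSA x).trans (hSB x).symm)
  have hsorted := PySem.List.sorted_eq_sorted_of_perm _ _ (fun x : List Char => x)
    (fun a b h => h) hperm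
  rw [pv_sorted_inst, hsorted, ← pv_sorted_inst]
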